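-- pv_equiv track=rewrite | github.com/LehuiChen/test_ADL | minimal_adl_ethene_butadiene_mace/src/minimal_adl/gaussian_ts_seed.py | _find_last_route_section
-- ===== SOURCE A (Python) =====
-- def _find_last_route_section(lines: list[str]) -> str | None:
--     route_lines: list[str] = []
--     collecting = False
--
--     for line in lines:
--         stripped = line.strip()
--         if stripped.startswith("#"):
--             if route_lines:
--                 route_lines = []
--             route_lines.append(stripped)
--             collecting = True
--             continue
--         if collecting:
--             if not stripped:
--                 break
--             route_lines.append(stripped)
--
--     if not route_lines:
--         return None
--     return " ".join(route_lines)
-- ===== SOURCE B (Python) =====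
-- def _find_last_route_section(lines: list[str]) -> str | None:
--     stripped = [l.strip() for l in lines]
--     # index of the first '#'-started line
--     first = next((i for i, s in enumerate(stripped) if s.startswith("#")), None)
--     if first is None:
--         return None
--     # block = lines from `first` up to (not including) the first blank line
--     block = []
--     for s in stripped[first:]:
--         if not s:
--             break
--         block.append(s)
--     # k = index in block of the last '#'-started line (k = 0 always works)
--     k = 0
--     for i, s in enumerate(block):
--         if s.startswith("#"):
--             k = i
--     return " ".join(block[k:])
-- ===== Notes on version B (the rewrite author's own statement) =====
-- stated objective: simpler
-- what changed: Replaced A's single accumulating state-machine loop (reset-on-#, collecting flag, break) by a locate-boundaries decomposition: strip all lines, drop the prefix before the first '#' line, cut the block at the first blank line, then keep the suffix from the last '#' line and join it.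
import Mathlib
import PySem

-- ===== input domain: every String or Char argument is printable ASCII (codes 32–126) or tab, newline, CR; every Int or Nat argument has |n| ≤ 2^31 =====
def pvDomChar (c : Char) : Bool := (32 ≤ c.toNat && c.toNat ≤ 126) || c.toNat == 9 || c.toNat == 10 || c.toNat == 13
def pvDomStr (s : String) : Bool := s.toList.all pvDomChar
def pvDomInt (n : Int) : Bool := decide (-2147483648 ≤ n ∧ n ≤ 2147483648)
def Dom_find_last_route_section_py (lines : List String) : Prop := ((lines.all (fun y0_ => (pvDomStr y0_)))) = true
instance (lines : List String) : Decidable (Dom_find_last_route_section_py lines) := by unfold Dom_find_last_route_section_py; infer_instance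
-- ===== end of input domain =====

-- B replaces A's single accumulating state-machine loop (reset-on-#, collecting flag, break) by a
-- locate-boundaries decomposition: strip all, drop to the first '#' line, cut at the first blank,
-- keep the suffix from the last '#' line; objective: simpler, same cost.

-- shared abbreviation for `stripped.startswith("#")` (used by both ports)
def pvHash (s : String) : Bool := PySem.Str.startswith s "#"

-- ===== PORT A =====
-- A's for-loop: state = (route_lines, collecting); 'break' returns the accumulator
def pvLoopA : List String → List String → Bool → List String
  | [], acc, _ => acc
  | l :: rest, acc, collecting =>
    let s := PySem.Str.strip l
    if pvHash s then pvLoopA rest [s] true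
    else if collecting then
      (if s = "" then acc else pvLoopA rest (acc ++ [s]) collecting)
    else pvLoopA rest acc collecting

def find_last_route_section_py (lines : List String) : Option String :=
  let route_lines := pvLoopA lines [] false
  if route_lines = [] then none else some (PySem.Str.join " " route_lines)

-- ===== PORT B =====
-- 'k = 0; for i, s in enumerate(block): if s.startswith("#"): k = i'
def pvLastK : List String → Nat → Nat → Nat
  | [], _, k => k
  | s :: rest, i, k => pvLastK rest (i + 1) (if pvHash s then i else k)

def find_last_route_section_py_alt (lines : List String) : Option String :=
  let stripped := lines.map PySem.Str.strip
  match stripped.findIdx? pvHash with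
  | none => none
  | some first =>
    let block := (stripped.drop first).takeWhile (fun x => !(x == ""))
    let k := pvLastK block 0 0
    some (PySem.Str.join " " (block.drop k))

-- ===== PRECONDITION & SPEC =====
def Spec_find_last_route_section_py (lines : List String) (out : Option String) : Prop := out = find_last_route_section_py_alt lines
instance (lines : List String) (out : Option String) : Decidable (Spec_find_last_route_section_py lines out) := by unfold Spec_find_last_route_section_py; infer_instance

-- ===== CLAIM (what is proved, stated in full; the proofs are below) =====
def Claim_equal_find_last_route_section_py : Prop := ∀ (lines : List String), Dom_find_last_route_section_py lines → Spec_find_last_route_section_py lines (find_last_route_section_py lines)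

-- ===== LEMMAS AND PROOFS =====

-- suffix of the block starting at its last '#' line (proof-only characterisation)
def pvSufLast : List String → List String
  | [] => []
  | s :: rest => if rest.any pvHash then pvSufLast rest else s :: rest

-- A's loop once collecting = true, on the pre-stripped tail
def pvCol : List String → List String → List String
  | acc, [] => acc
  | acc, s :: rest =>
    if pvHash s then pvCol [s] rest
    else if s = "" then acc else pvCol (acc ++ [s]) rest

theorem pvHash_ne_empty {s : String} (h : pvHash s = true) : (s == "") = false := by
  cases hb : s == ""
  · rfl
  · exact absurd h (by simp at hb; subst hb; decide)

theorem pvLoopA_true (lines : List String) : ∀ acc,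
    pvLoopA lines acc true = pvCol acc (lines.map PySem.Str.strip) := by
  induction lines with
  | nil => intro acc; rfl
  | cons l rest ih =>
    intro acc
    simp only [pvLoopA, pvCol, List.map]
    by_cases h : pvHash (PySem.Str.strip l) = true
    · simp [h, ih]
    · by_cases he : PySem.Str.strip l = "" <;> simp [h, he, ih]

theorem pvLoopA_skip (lines : List String) :
    pvLoopA lines [] false =
      match (lines.map PySem.Str.strip).dropWhile (fun s => !pvHash s) with
      | [] => []
      | s :: t => pvCol [s] t := by
  induction lines with
  | nil => rfl
  | cons l rest ih =>
    simp only [pvLoopA, List.map, List.dropWhile_cons]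
    by_cases h : pvHash (PySem.Str.strip l) = true
    · simp only [h, Bool.not_true, Bool.false_eq_true, if_true, if_false]
      exact pvLoopA_true rest [PySem.Str.strip l]
    · simp only [Bool.not_eq_true] at h
      simp only [h, Bool.false_eq_true, Bool.not_false, if_false, if_true]
      exact ih

theorem pvCol_val : ∀ (L : List String) (acc : List String), acc ≠ [] →
    pvCol acc L =
      (let block := L.takeWhile (fun x => !(x == ""))
       if block.any pvHash then pvSufLast block else acc ++ block) := by
  intro L
  induction L with
  | nil => intro acc _; simp [pvCol]
  | cons s rest ih =>
    intro acc hacc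
    simp only [pvCol, List.takeWhile_cons]
    by_cases h : pvHash s = true
    · rw [if_pos h, ih [s] (by simp)]
      simp only [pvHash_ne_empty h, Bool.not_false, if_true, List.any_cons, h, Bool.true_or,
        pvSufLast]
      by_cases ha : (rest.takeWhile (fun x => !(x == ""))).any pvHash = true
      · rw [if_pos ha, if_pos ha]
      · rw [if_neg ha, if_neg ha, List.singleton_append]
    · rw [if_neg h]
      by_cases he : s = ""
      · subst he
        simp
      · rw [if_neg he, ih (acc ++ [s]) (by simp)]
        have hse : (s == "") = false := by simp [he]
        simp only [hse, Bool.not_false, if_true, List.any_cons, h]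
        simp only [Bool.not_eq_true] at h
        simp only [Bool.false_or]
        by_cases ha : (rest.takeWhile (fun x => !(x == ""))).any pvHash = true
        · rw [if_pos ha, if_pos ha]
          simp only [pvSufLast, ha, if_true]
        · rw [if_neg ha, if_neg ha, List.append_assoc, List.singleton_append]

theorem pvSufLast_ne_nil : ∀ (L : List String), L ≠ [] → pvSufLast L ≠ [] := by
  intro L
  induction L with
  | nil => simp
  | cons s rest ih =>
    intro _
    simp only [pvSufLast]
    by_cases ha : rest.any pvHash = true
    · rw [if_pos ha]
      exact ih (by rintro rfl; simp at ha)
    · rw [if_neg ha]; simp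

theorem pvLastK_const : ∀ (rest : List String) (i k : Nat), rest.any pvHash = false →
    pvLastK rest i k = k := by
  intro rest
  induction rest with
  | nil => intro i k _; rfl
  | cons s r ih =>
    intro i k h
    simp only [List.any_cons, Bool.or_eq_false_iff] at h
    simp only [pvLastK, h.1, Bool.false_eq_true, if_false]
    exact ih _ _ h.2

theorem pvLastK_irrel : ∀ (rest : List String) (i k k' : Nat), rest.any pvHash = true →
    pvLastK rest i k = pvLastK rest i k' := by
  intro rest
  induction rest with
  | nil => intro i k k' h; simp at h
  | cons s r ih =>
    intro i k k' h
    simp only [pvLastK]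
    by_cases hs : pvHash s = true
    · simp [hs]
    · simp only [List.any_cons] at h
      simp only [Bool.not_eq_true] at hs
      rw [hs] at h
      simp only [Bool.false_or] at h
      simp only [hs, Bool.false_eq_true, if_false]
      exact ih _ _ _ h

theorem pvLastK_shift : ∀ (rest : List String) (i k : Nat),
    pvLastK rest (i + 1) (k + 1) = pvLastK rest i k + 1 := by
  intro rest
  induction rest with
  | nil => intro i k; rfl
  | cons s r ih =>
    intro i k
    simp only [pvLastK]
    by_cases hs : pvHash s = true
    · simp only [hs, if_true]
      exact ih _ _
    · simp only [hs, Bool.false_eq_true, if_false]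
      exact ih _ _

theorem drop_pvLastK : ∀ (block : List String), block.any pvHash = true →
    block.drop (pvLastK block 0 0) = pvSufLast block := by
  intro block
  induction block with
  | nil => intro h; simp at h
  | cons s rest ih =>
    intro h
    have h0 : pvLastK (s :: rest) 0 0 = pvLastK rest 1 0 := by
      simp [pvLastK]
    rw [h0]
    by_cases ha : rest.any pvHash = true
    · rw [pvLastK_irrel rest 1 0 1 ha]
      have : pvLastK rest 1 1 = pvLastK rest 0 0 + 1 := pvLastK_shift rest 0 0
      rw [this, List.drop_succ_cons, ih ha]
      simp [pvSufLast, ha]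
    · have hs : pvHash s = true := by
        simp only [List.any_cons] at h
        simp only [Bool.not_eq_true] at ha
        rw [ha] at h
        simpa using h
      rw [pvLastK_const rest 1 0 (by simpa using ha), List.drop_zero]
      simp [pvSufLast, ha]

theorem dropWhile_not_findIdx (xs : List String) :
    xs.dropWhile (fun x => !pvHash x) =
      (match xs.findIdx? pvHash with | none => [] | some i => xs.drop i) := by
  induction xs with
  | nil => rfl
  | cons x rest ih =>
    rw [List.dropWhile_cons, List.findIdx?_cons]
    by_cases hx : pvHash x = true
    · simp [hx]
    · simp only [Bool.not_eq_true] at hx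
      simp only [hx, Bool.false_eq_true, Bool.not_false, if_true, if_false, ih]
      cases hf : rest.findIdx? pvHash with
      | none => simp
      | some i => simp [List.drop_succ_cons]

-- ===== VERDICT (by name: the statement is the Claim_ definition above) =====
theorem find_last_route_section_py_spec : Claim_equal_find_last_route_section_py := by
  intro lines _
  show find_last_route_section_py lines = find_last_route_section_py_alt lines
  simp only [find_last_route_section_py, find_last_route_section_py_alt]
  rw [pvLoopA_skip]
  cases hf : (lines.map PySem.Str.strip).findIdx? pvHash with
  | none =>
    have hdw : (lines.map PySem.Str.strip).dropWhile (fun x => !pvHash x) = [] := by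
      rw [dropWhile_not_findIdx, hf]
    rw [hdw]
    simp
  | some i =>
    simp only []
    have hdw : (lines.map PySem.Str.strip).dropWhile (fun x => !pvHash x) =
        (lines.map PySem.Str.strip).drop i := by
      rw [dropWhile_not_findIdx, hf]
    have hlt : i < (lines.map PySem.Str.strip).length :=
      (List.findIdx?_eq_some_iff_findIdx_eq.mp hf).1
    have hnil : (lines.map PySem.Str.strip).drop i ≠ [] := by
      intro hcon
      rw [List.drop_eq_nil_iff] at hcon
      omega
    obtain ⟨s, t, hd⟩ := List.exists_cons_of_ne_nil hnil
    rw [hdw, hd]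
    have hs : pvHash s = true := by
      have h0 := List.head?_dropWhile_not (p := fun x => !pvHash x)
        (l := lines.map PySem.Str.strip)
      rw [hdw, hd] at h0
      simpa using h0
    simp only []
    rw [pvCol_val t [s] (by simp)]
    rw [List.takeWhile_cons, pvHash_ne_empty hs]
    simp only [Bool.not_false, if_true]
    rw [drop_pvLastK _ (by simp [hs])]
    simp only [pvSufLast]
    by_cases ha : (t.takeWhile (fun x => !(x == ""))).any pvHash = true
    · rw [if_pos ha, if_pos ha]
      have hne : pvSufLast (t.takeWhile (fun x => !(x == ""))) ≠ [] :=
        pvSufLast_ne_nil _ (by rintro h; rw [h] at ha; simp at ha)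
      rw [if_neg hne]
    · rw [if_neg ha, if_neg ha, List.singleton_append, if_neg (by simp)]
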